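-- pv_equiv track=rewrite | github.com/RickySkywalker/SR-PredictAO-official | LESSR+NDF/data_process.py | nested_split
-- ===== SOURCE A (Python) =====
-- def nested_split(raw_data):
--     X = []
--     y = []
--
--     for i in range(len(raw_data)):
--         curr_ls = raw_data[i]
--         for j in range(1, len((curr_ls))):
--             curr_X = []
--             for k in range(j):
--                 curr_X.append(curr_ls[k])
--             y.append(curr_ls[j])
--             X.append(curr_X)
--
--     return X, y
-- ===== SOURCE B (Python) =====
-- def nested_split(raw_data):
--     # pass 1: the targets are simply every element past the first, flattened
--     y = [v for ls in raw_data for v in ls[1:]]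
--     # pass 2: per sequence, build the prefixes longest-first by repeatedly
--     # popping the last element, then reverse into shortest-first order
--     X = []
--     for ls in raw_data:
--         t = list(ls)
--         chunk = []
--         while len(t) > 1:
--             t.pop()
--             chunk.append(list(t))
--         chunk.reverse()
--         X.extend(chunk)
--     return X, y
-- ===== Notes on version B (the rewrite author's own statement) =====
-- stated objective: faster
-- what changed: Replaces A's single nested index loop (rebuilding each prefix element-by-element with an inner range(j) append loop) by two staged passes: y is emitted first as one flat comprehension over each tail ls[1:], then X is built per sequence back-to-front by repeatedly popping the last element and copying, finally reversed into order.
import Mathlib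
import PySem

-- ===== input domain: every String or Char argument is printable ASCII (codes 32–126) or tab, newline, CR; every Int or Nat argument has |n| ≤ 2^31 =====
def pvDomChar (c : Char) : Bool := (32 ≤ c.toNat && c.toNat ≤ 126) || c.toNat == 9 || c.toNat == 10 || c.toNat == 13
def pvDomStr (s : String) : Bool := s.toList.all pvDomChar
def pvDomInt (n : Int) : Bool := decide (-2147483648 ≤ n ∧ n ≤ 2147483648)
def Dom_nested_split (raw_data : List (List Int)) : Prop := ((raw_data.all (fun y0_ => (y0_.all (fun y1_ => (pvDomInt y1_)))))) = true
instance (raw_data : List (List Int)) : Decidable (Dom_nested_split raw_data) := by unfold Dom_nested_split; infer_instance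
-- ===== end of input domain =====

-- B computes y and X in two staged passes (y as one flat pass over the tails; X per
-- sequence back-to-front by popping the last element, then reversing); same output.

-- ===== PORT A =====
-- literal transliteration of Source A: three nested index loops, curr_X rebuilt from scratch
def nested_split (raw_data : List (List Int)) : List (List Int) × List Int :=
  (PySem.List.pyRange 0 (raw_data.length : Int) 1).foldl
    (fun (st : List (List Int) × List Int) i =>
      let curr_ls := PySem.List.pyGetD raw_data i []
      (PySem.List.pyRange 1 (curr_ls.length : Int) 1).foldl
        (fun st j =>
          let curr_X := (PySem.List.pyRange 0 j 1).foldl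
            (fun cx k => cx ++ [PySem.List.pyGetD curr_ls k 0]) []
          (st.1 ++ [curr_X], st.2 ++ [PySem.List.pyGetD curr_ls j 0]))
        st)
    ([], [])

-- ===== PORT B =====
-- the 'while len(t) > 1: t.pop(); chunk.append(list(t))' loop of Source B
def popLoop (t : List Int) (chunk : List (List Int)) : List (List Int) :=
  if _h : 1 < t.length then
    popLoop t.dropLast (chunk ++ [t.dropLast])
  else chunk
termination_by t.length
decreasing_by
  rw [List.length_dropLast]; omega

-- literal transliteration of Source B: y as one flat comprehension over ls[1:];
-- X per sequence via popLoop then chunk.reverse, extended onto X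
def nested_split_alt (raw_data : List (List Int)) : List (List Int) × List Int :=
  let y := raw_data.foldl (fun acc ls => acc ++ PySem.List.slice ls (some 1) none) []
  let X := raw_data.foldl (fun X ls => X ++ (popLoop ls []).reverse) []
  (X, y)

-- ===== PRECONDITION & SPEC =====
def Spec_nested_split (raw_data : List (List Int)) (out : List (List Int) × List Int) : Prop := out = nested_split_alt raw_data
instance (raw_data : List (List Int)) (out : List (List Int) × List Int) : Decidable (Spec_nested_split raw_data out) := by unfold Spec_nested_split; infer_instance

-- ===== CLAIM (what is proved, stated in full; the proofs are below) =====
def Claim_equal_nested_split : Prop := ∀ (raw_data : List (List Int)), Dom_nested_split raw_data → Spec_nested_split raw_data (nested_split raw_data)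

-- ===== LEMMAS AND PROOFS =====

-- the common per-sequence prefix list: l.take 1, l.take 2, …, l.take (len-1)
def takes (l : List Int) : List (List Int) :=
  (List.range (l.length - 1)).map (fun k => l.take (k + 1))

-- A's innermost loop builds l.take n
theorem buildX_eq_take (l : List Int) : ∀ (n : Nat), n ≤ l.length → ∀ (acc : List Int),
    (PySem.List.pyRange 0 (n : Int) 1).foldl (fun cx k => cx ++ [PySem.List.pyGetD l k 0]) acc
      = acc ++ l.take n := by
  intro n
  induction n with
  | zero => intro _ acc; simp [PySem.List.pyRange_one_eq_nil]
  | succ n ih =>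
    intro h acc
    have h1 : ((n + 1 : Nat) : Int) = (n : Int) + 1 := by push_cast; ring
    rw [h1, PySem.List.pyRange_one_succ_right (by positivity), List.foldl_append,
      ih (by omega) acc]
    have hn : n < l.length := by omega
    have ht : l.take (n + 1) = l.take n ++ [l[n]] := by
      rw [List.take_add_one, List.getElem?_eq_getElem hn]
      rfl
    simp only [List.foldl_cons, List.foldl_nil]
    rw [ht, PySem.List.pyGetD_natCast, List.getD_eq_getElem l 0 hn, List.append_assoc]

-- A's middle loop appends exactly takes l and l.drop 1
theorem stepA_eq (l : List Int) (st : List (List Int) × List Int) :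
    ((PySem.List.pyRange 1 (l.length : Int) 1).foldl
        (fun st j =>
          let curr_X := (PySem.List.pyRange 0 j 1).foldl
            (fun cx k => cx ++ [PySem.List.pyGetD l k 0]) []
          (st.1 ++ [curr_X], st.2 ++ [PySem.List.pyGetD l j 0]))
        st)
      = (st.1 ++ takes l, st.2 ++ l.drop 1) := by
  obtain ⟨X, y⟩ := st
  rw [PySem.List.foldl_prod_mk
    (f := fun (a : List (List Int)) (j : Int) =>
      a ++ [(PySem.List.pyRange 0 j 1).foldl
        (fun cx k => cx ++ [PySem.List.pyGetD l k 0]) []])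
    (g := fun (b : List Int) (j : Int) => b ++ [PySem.List.pyGetD l j 0])]
  rw [PySem.List.foldl_append_singleton_eq_map, PySem.List.foldl_append_singleton_eq_map]
  have hy : (PySem.List.pyRange 1 (l.length : Int) 1).map
      (fun j => PySem.List.pyGetD l j 0) = l.drop 1 := by
    simpa using PySem.List.map_pyGetD_pyRange' l 0 (a := 1) (by norm_num)
  have hx : (PySem.List.pyRange 1 (l.length : Int) 1).map
      (fun j => (PySem.List.pyRange 0 j 1).foldl
        (fun cx k => cx ++ [PySem.List.pyGetD l k 0]) []) = takes l := by
    rw [List.map_congr_left (g := fun j => l.take j.toNat)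
      (fun j hj => by
        rw [PySem.List.mem_pyRange_one] at hj
        have hj1 : ((j.toNat : Nat) : Int) = j := by omega
        have hle : j.toNat ≤ l.length := by omega
        rw [← hj1, buildX_eq_take l j.toNat hle []]
        exact List.nil_append _)]
    rw [PySem.List.pyRange_one, List.map_map]
    unfold takes
    have hlen : ((l.length : Int) - 1).toNat = l.length - 1 := by omega
    rw [hlen]
    apply List.map_congr_left
    intro k _
    have : ((1 : Int) + (k : Int)).toNat = k + 1 := by omega
    simp [this]
  rw [hx, hy]

-- popLoop's accumulator prepends
theorem popLoop_acc (n : Nat) : ∀ (t : List Int), t.length = n → ∀ (a b : List (List Int)),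
    popLoop t (a ++ b) = a ++ popLoop t b := by
  induction n using Nat.strong_induction_on with
  | _ n ih =>
    intro t ht a b
    by_cases h : 1 < t.length
    · rw [popLoop, dif_pos h, List.append_assoc,
        ih (n - 1) (by omega) t.dropLast (by rw [List.length_dropLast, ht]) a
          (b ++ [t.dropLast])]
      conv_rhs => rw [popLoop, dif_pos h]
    · rw [popLoop, dif_neg h, popLoop, dif_neg h]

-- reversing the longest-first pop chunk gives takes
theorem popLoop_reverse (n : Nat) : ∀ (l : List Int), l.length = n →
    (popLoop l []).reverse = takes l := by
  induction n using Nat.strong_induction_on with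
  | _ n ih =>
    intro l hl
    by_cases h : 1 < l.length
    · rw [popLoop, dif_pos h]
      have hdl : l.dropLast.length = n - 1 := by rw [List.length_dropLast, hl]
      have hacc : popLoop l.dropLast ([] ++ [l.dropLast]) =
          popLoop l.dropLast ([l.dropLast] ++ []) := by simp
      rw [hacc, popLoop_acc (n - 1) l.dropLast hdl [l.dropLast] [],
        List.reverse_append, ih (n - 1) (by omega) l.dropLast hdl]
      -- takes l.dropLast ++ [l.dropLast] = takes l
      unfold takes
      have hr : l.dropLast.length - 1 = l.length - 2 := by
        rw [List.length_dropLast]; omega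
      have hlen1 : l.length - 1 = (l.length - 2) + 1 := by omega
      rw [hr, hlen1, List.range_succ, List.map_append, List.map_singleton]
      congr 1
      · apply List.map_congr_left
        intro k hk
        rw [List.mem_range] at hk
        rw [List.dropLast_eq_take, List.take_take, min_eq_left (by omega)]
      · rw [List.dropLast_eq_take, hlen1, List.reverse_singleton]
    · rw [popLoop, dif_neg h]
      unfold takes
      have : l.length - 1 = 0 := by omega
      simp [this]

theorem nested_split_eq (raw_data : List (List Int)) :
    nested_split raw_data = nested_split_alt raw_data := by
  have hA : nested_split raw_data
      = raw_data.foldl (fun (st : List (List Int) × List Int) l =>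
          (st.1 ++ takes l, st.2 ++ l.drop 1)) ([], []) := by
    unfold nested_split
    rw [PySem.List.foldl_pyRange_zero_pyGetD' raw_data []
      (fun (st : List (List Int) × List Int) curr_ls =>
        (PySem.List.pyRange 1 (curr_ls.length : Int) 1).foldl
          (fun st j =>
            let curr_X := (PySem.List.pyRange 0 j 1).foldl
              (fun cx k => cx ++ [PySem.List.pyGetD curr_ls k 0]) []
            (st.1 ++ [curr_X], st.2 ++ [PySem.List.pyGetD curr_ls j 0]))
          st) ([], [])]
    apply PySem.List.foldl_congr_mem
    intro st l _
    exact stepA_eq l st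
  rw [hA, PySem.List.foldl_prod_mk
    (f := fun (a : List (List Int)) (l : List Int) => a ++ takes l)
    (g := fun (b : List Int) (l : List Int) => b ++ l.drop 1)]
  unfold nested_split_alt
  dsimp only
  rw [PySem.List.foldl_append_eq_flatMap, PySem.List.foldl_append_eq_flatMap,
    PySem.List.foldl_append_eq_flatMap, PySem.List.foldl_append_eq_flatMap,
    List.nil_append, List.nil_append, List.nil_append, List.nil_append]
  have hX : (fun (l : List Int) => (popLoop l []).reverse) = takes :=
    funext fun l => popLoop_reverse l.length l rfl
  have hy : (fun (ls : List Int) => PySem.List.slice ls (some 1) none)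
      = fun (ls : List Int) => ls.drop 1 :=
    funext fun ls => by rw [PySem.List.slice_from_one, ← List.drop_one]
  rw [hX, hy]

-- ===== VERDICT (by name: the statement is the Claim_ definition above) =====
theorem nested_split_spec : Claim_equal_nested_split := by
  intro raw_data _
  unfold Spec_nested_split
  exact nested_split_eq raw_data
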